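-- pv_equiv track=rewrite | github.com/BelleGarlick/Comp61332-Text-Mining---Dream-Team | src/sentence_classifier/analysis/roc.py | __create_classification_indexes
-- ===== SOURCE A (Python) =====
-- def __create_classification_indexes(true_labels: list, predicted_labels: list) -> dict:
--     """
--     Create the classification indexes based on the given labels.
--
--     This function will extract all unique labels from all the given classes and puts them into the classification
--     indexes.
--
--     Args:
--         true_labels: The true labels of the data.
--         predicted_labels: The predicted labels of the data.
--
--     Returns:
--         The mapping of given labels to indexes within a confusion matrix.
--     """
--     classification_indexes = {}
--     for classes in true_labels:
--         if classes not in classification_indexes: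
--             classification_indexes[classes] = len(classification_indexes)
--     for classes in predicted_labels:
--         if classes not in classification_indexes:
--             classification_indexes[classes] = len(classification_indexes)
--     return classification_indexes
-- ===== SOURCE B (Python) =====
-- def __create_classification_indexes(true_labels: list, predicted_labels: list) -> dict:
--     seq = true_labels + predicted_labels
--     return {x: len(set(seq[:seq.index(x)])) for x in seq}
-- ===== Notes on version B (the rewrite author's own statement) =====
-- stated objective: alternative
-- what changed: Instead of growing a dict and assigning len(dict) on first sight, B computes each label's index independently by a closed per-label formula: the number of distinct labels strictly before its first occurrence in the concatenated sequence (no incremental index counter at all).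
import Mathlib
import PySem

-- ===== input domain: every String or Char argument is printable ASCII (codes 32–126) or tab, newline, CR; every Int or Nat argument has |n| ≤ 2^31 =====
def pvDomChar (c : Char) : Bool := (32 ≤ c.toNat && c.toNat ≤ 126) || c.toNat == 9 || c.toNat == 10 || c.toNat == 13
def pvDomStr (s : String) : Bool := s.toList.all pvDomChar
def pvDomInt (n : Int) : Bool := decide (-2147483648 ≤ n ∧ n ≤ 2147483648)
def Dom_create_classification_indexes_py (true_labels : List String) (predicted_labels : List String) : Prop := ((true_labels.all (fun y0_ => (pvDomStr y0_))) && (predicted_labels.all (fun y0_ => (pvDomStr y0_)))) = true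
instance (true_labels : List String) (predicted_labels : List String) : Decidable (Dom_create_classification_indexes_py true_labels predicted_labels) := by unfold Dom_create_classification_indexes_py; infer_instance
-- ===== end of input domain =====

-- ===== PORT A =====
-- B drops A's incremental index counter: each label's index is computed independently as the
-- number of distinct labels before its first occurrence (alternative decomposition, not faster).
-- loop body of both Python for-loops in A: if classes not in d: d[classes] = len(d)
def pvStepA (d : PySem.Dict String Int) (classes : String) : PySem.Dict String Int :=
  if ¬ d.contains classes then d.insert classes d.size else d

def create_classification_indexes_py (true_labels : List String) (predicted_labels : List String) : List (String × Int) :=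
  let d1 := true_labels.foldl pvStepA PySem.Dict.empty
  let d2 := predicted_labels.foldl pvStepA d1
  d2.items

-- ===== PORT B =====
-- len(set(seq[:seq.index(x)])) — the number of distinct labels before x's first occurrence in seq
def pvVal (seq : List String) (x : String) : Int :=
  PySem.Set.len (PySem.Set.ofList
    (PySem.List.slice seq none (some (((PySem.List.index? seq x).getD 0 : Nat) : Int))))

def create_classification_indexes_py_alt (true_labels : List String) (predicted_labels : List String) : List (String × Int) :=
  let seq := true_labels ++ predicted_labels
  -- {x: len(set(seq[:seq.index(x)])) for x in seq}
  (seq.foldl (fun d x => d.insert x (pvVal seq x)) PySem.Dict.empty).items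

-- ===== PRECONDITION & SPEC =====
def Spec_create_classification_indexes_py (true_labels : List String) (predicted_labels : List String) (out : List (String × Int)) : Prop := out = create_classification_indexes_py_alt true_labels predicted_labels
instance (true_labels : List String) (predicted_labels : List String) (out : List (String × Int)) : Decidable (Spec_create_classification_indexes_py true_labels predicted_labels out) := by unfold Spec_create_classification_indexes_py; infer_instance

-- ===== CLAIM (what is proved, stated in full; the proofs are below) =====
def Claim_equal_create_classification_indexes_py : Prop := ∀ (true_labels : List String) (predicted_labels : List String), Dom_create_classification_indexes_py true_labels predicted_labels → Spec_create_classification_indexes_py true_labels predicted_labels (create_classification_indexes_py true_labels predicted_labels)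

-- ===== LEMMAS AND PROOFS =====

-- ofList over a snoc is Set.add
theorem pv_ofList_snoc (pre : List String) (x : String) :
    PySem.Set.ofList (pre ++ [x]) = PySem.Set.add (PySem.Set.ofList pre) x := by
  rw [PySem.Set.ofList_eq_foldl, PySem.Set.ofList_eq_foldl, List.foldl_append]; rfl

-- at the first occurrence of x in seq, pvVal is the number of distinct earlier labels
theorem pv_val_first (pre suf : List String) (x : String) (h : x ∉ pre) :
    pvVal (pre ++ x :: suf) x = ((PySem.Set.ofList pre).length : Int) := by
  have hidx : PySem.List.index? (pre ++ x :: suf) x = some pre.length :=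
    (PySem.List.index?_eq_some_iff _ _ _).mpr ⟨pre, suf, rfl, rfl, h⟩
  rw [pvVal, hidx]
  rw [show ((some pre.length).getD 0) = pre.length from rfl,
    PySem.List.slice_to_natCast, List.take_left, PySem.Set.len_eq]

-- the target shape both dicts reach after processing a prefix 'pre' of seq
theorem pv_keys (d : PySem.Dict String Int) (seq pre : List String)
    (hd : d.items = (PySem.Set.ofList pre).map (fun y => (y, pvVal seq y))) (x : String) :
    d.contains x = decide (x ∈ pre) := by
  rw [PySem.Dict.contains_eq_decide_mem_keys]
  have : d.keys = PySem.Set.ofList pre := by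
    simp [PySem.Dict.keys, hd, List.map_map, Function.comp_def]
  rw [this]
  simp [PySem.Set.mem_ofList]

-- invariant for A's fold
theorem pv_foldA (seq : List String) : ∀ (suf pre : List String) (d : PySem.Dict String Int),
    seq = pre ++ suf →
    d.items = (PySem.Set.ofList pre).map (fun y => (y, pvVal seq y)) →
    (suf.foldl pvStepA d).items = (PySem.Set.ofList seq).map (fun y => (y, pvVal seq y)) := by
  intro suf
  induction suf with
  | nil => intro pre d hseq hd; simp at hseq; simpa [hseq] using hd
  | cons x rest ih =>
    intro pre d hseq hd
    have hcont := pv_keys d seq pre hd x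
    rw [List.foldl_cons]
    by_cases hx : x ∈ pre
    · have h1 : pvStepA d x = d := by simp [pvStepA, hcont, hx]
      rw [h1]
      apply ih (pre ++ [x]) d (by simpa using hseq)
      rw [pv_ofList_snoc]
      have : PySem.Set.add (PySem.Set.ofList pre) x = PySem.Set.ofList pre := by
        simp [PySem.Set.add, PySem.Set.contains, PySem.Set.mem_ofList, hx]
      rw [this, hd]
    · have hsize : (d.size : Int) = ((PySem.Set.ofList pre).length : Int) := by
        simp [PySem.Dict.size, hd]
      have h1 : pvStepA d x = d.insert x d.size := by simp [pvStepA, hcont, hx]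
      rw [h1]
      apply ih (pre ++ [x]) _ (by simpa using hseq)
      rw [PySem.Dict.items_insert_of_not_contains _ _ (by simp [hcont, hx])]
      rw [hd, pv_ofList_snoc]
      have hadd : PySem.Set.add (PySem.Set.ofList pre) x = PySem.Set.ofList pre ++ [x] := by
        simp [PySem.Set.add, PySem.Set.contains, PySem.Set.mem_ofList, hx]
      rw [hadd, List.map_append, List.map_singleton]
      have hval : pvVal seq x = (d.size : Int) := by
        rw [hsize, hseq]; exact pv_val_first pre rest x hx
      rw [hval]

-- invariant for B's fold (insert unconditionally; duplicates overwrite with the same value)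
theorem pv_foldB (seq : List String) : ∀ (suf pre : List String) (d : PySem.Dict String Int),
    seq = pre ++ suf →
    d.items = (PySem.Set.ofList pre).map (fun y => (y, pvVal seq y)) →
    (suf.foldl (fun d x => d.insert x (pvVal seq x)) d).items =
      (PySem.Set.ofList seq).map (fun y => (y, pvVal seq y)) := by
  intro suf
  induction suf with
  | nil => intro pre d hseq hd; simp at hseq; simpa [hseq] using hd
  | cons x rest ih =>
    intro pre d hseq hd
    have hcont := pv_keys d seq pre hd x
    rw [List.foldl_cons]
    apply ih (pre ++ [x]) _ (by simpa using hseq)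
    by_cases hx : x ∈ pre
    · rw [PySem.Dict.items_insert_of_contains _ _ (by simp [hcont, hx])]
      rw [hd, List.map_map]
      have hpt : ∀ y, ((fun p => if (p.1 == x) = true then (x, pvVal seq x) else p) ∘
          (fun y => (y, pvVal seq y))) y = (y, pvVal seq y) := by
        intro y
        by_cases hyx : y = x
        · subst hyx; simp
        · simp [Function.comp, hyx]
      rw [List.map_congr_left (fun y _ => hpt y)]
      rw [pv_ofList_snoc]
      have : PySem.Set.add (PySem.Set.ofList pre) x = PySem.Set.ofList pre := by
        simp [PySem.Set.add, PySem.Set.contains, PySem.Set.mem_ofList, hx]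
      rw [this]
    · rw [PySem.Dict.items_insert_of_not_contains _ _ (by simp [hcont, hx])]
      rw [hd, pv_ofList_snoc]
      have hadd : PySem.Set.add (PySem.Set.ofList pre) x = PySem.Set.ofList pre ++ [x] := by
        simp [PySem.Set.add, PySem.Set.contains, PySem.Set.mem_ofList, hx]
      rw [hadd, List.map_append, List.map_singleton]

-- ===== VERDICT (by name: the statement is the Claim_ definition above) =====
theorem create_classification_indexes_py_spec : Claim_equal_create_classification_indexes_py := by
  intro true_labels predicted_labels _
  show (predicted_labels.foldl pvStepA (true_labels.foldl pvStepA PySem.Dict.empty)).items = _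
  rw [← List.foldl_append]
  have hA := pv_foldA (true_labels ++ predicted_labels) (true_labels ++ predicted_labels) []
    PySem.Dict.empty rfl (by simp [PySem.Dict.empty, PySem.Set.ofList])
  have hB := pv_foldB (true_labels ++ predicted_labels) (true_labels ++ predicted_labels) []
    PySem.Dict.empty rfl (by simp [PySem.Dict.empty, PySem.Set.ofList])
  rw [hA]
  exact hB.symm
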